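-- pv_equiv track=rewrite | github.com/gharshal/Assignments | Lab 6 Exercise 4.py | sum_5_consecutive
-- ===== SOURCE A (Python) =====
-- def sum_5_consecutive(x):
--     l = len(x)
--     if l < 5:
--         return False
--     i = 0
--     while i <= len(x)-5:
--         if x[i]+x[i+1]+x[i+2]+x[i+3]+x[i+4]==0:
--             return True
--         i = i +1
--     else:
--         return False
-- ===== SOURCE B (Python) =====
-- def sum_5_consecutive(x):
--     n = len(x)
--     if n < 5:
--         return False
--     s = x[0] + x[1] + x[2] + x[3] + x[4]
--     if s == 0:
--         return True
--     for i in range(1, n - 4):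
--         s += x[i + 4] - x[i - 1]
--         if s == 0:
--             return True
--     return False
-- ===== Notes on version B (the rewrite author's own statement) =====
-- stated objective: faster
-- what changed: B maintains one rolling window sum updated by adding the entering and subtracting the leaving element, instead of recomputing the 5-term sum for every window.
import Mathlib
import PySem

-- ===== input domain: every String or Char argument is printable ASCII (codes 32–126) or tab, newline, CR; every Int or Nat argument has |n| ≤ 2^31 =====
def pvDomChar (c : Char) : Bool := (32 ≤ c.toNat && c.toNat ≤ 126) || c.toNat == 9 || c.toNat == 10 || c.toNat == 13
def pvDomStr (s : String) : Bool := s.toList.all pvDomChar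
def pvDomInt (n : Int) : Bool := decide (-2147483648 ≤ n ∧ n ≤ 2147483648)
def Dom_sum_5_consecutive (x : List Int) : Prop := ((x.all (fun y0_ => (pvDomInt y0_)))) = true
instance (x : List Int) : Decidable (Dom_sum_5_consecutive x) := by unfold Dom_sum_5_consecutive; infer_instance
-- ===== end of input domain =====

-- B replaces A's per-window 5-term re-summation by a single rolling sum (objective: faster, constant factor).

-- ===== PORT A =====
-- x[j]: every index used is in range (the loop bound guarantees it), so .getD 0 is exact
def pvG (x : List Int) (j : Int) : Int := (PySem.List.pyGet? x j).getD 0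

-- the while loop: fuel = number of remaining iterations (i runs while i ≤ len(x)-5)
def pvLoopA (x : List Int) : Nat → Int → Bool
  | 0, _ => false
  | n+1, i =>
    if pvG x i + pvG x (i+1) + pvG x (i+2) + pvG x (i+3) + pvG x (i+4) == 0 then true
    else pvLoopA x n (i+1)

def sum_5_consecutive (x : List Int) : Bool :=
  if x.length < 5 then false
  else pvLoopA x (x.length - 4) 0

-- ===== PORT B =====
-- the for loop over range(1, n-4): fuel = number of remaining iterations, i the index, s the rolling sum
def pvLoopB (x : List Int) : Nat → Int → Int → Bool
  | 0, _, _ => false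
  | n+1, i, s =>
    let s' := s + (pvG x (i+4) - pvG x (i-1))
    if s' == 0 then true else pvLoopB x n (i+1) s'

def sum_5_consecutive_alt (x : List Int) : Bool :=
  if x.length < 5 then false
  else
    let s := pvG x 0 + pvG x 1 + pvG x 2 + pvG x 3 + pvG x 4
    if s == 0 then true else pvLoopB x (x.length - 5) 1 s

-- ===== PRECONDITION & SPEC =====
def Spec_sum_5_consecutive (x : List Int) (out : Bool) : Prop := out = sum_5_consecutive_alt x
instance (x : List Int) (out : Bool) : Decidable (Spec_sum_5_consecutive x out) := by unfold Spec_sum_5_consecutive; infer_instance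

-- ===== CLAIM (what is proved, stated in full; the proofs are below) =====
def Claim_equal_sum_5_consecutive : Prop := ∀ (x : List Int), Dom_sum_5_consecutive x → Spec_sum_5_consecutive x (sum_5_consecutive x)

-- ===== LEMMAS AND PROOFS =====
-- the current fresh 5-term window sum at index i
def pvW (x : List Int) (i : Int) : Int :=
  pvG x i + pvG x (i+1) + pvG x (i+2) + pvG x (i+3) + pvG x (i+4)

-- rolling update: the window at i+1 is the window at i plus the entering minus the leaving element
theorem pvW_shift (x : List Int) (i : Int) :
    pvW x (i+1) = pvW x i + (pvG x (i+1+4) - pvG x i) := by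
  unfold pvW
  have h1 : i + 1 + 1 = i + 2 := by ring
  have h2 : i + 1 + 2 = i + 3 := by ring
  have h3 : i + 1 + 3 = i + 4 := by ring
  rw [h1, h2, h3]; ring

-- A's remaining loop equals: test the current window, then run B's rolling loop with that sum
theorem pvLoopA_eq (x : List Int) : ∀ (k : Nat) (i : Int),
    pvLoopA x (k+1) i = (if pvW x i == 0 then true else pvLoopB x k (i+1) (pvW x i)) := by
  intro k
  induction k with
  | zero => intro i; simp [pvLoopA, pvLoopB, pvW]
  | succ n ih =>
    intro i
    show (if pvW x i == 0 then true else pvLoopA x (n+1) (i+1)) = _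
    rw [ih (i+1)]
    by_cases h : pvW x i = 0
    · simp [h]
    · have hne : (pvW x i == 0) = false := by simp [h]
      rw [hne]
      simp only [Bool.false_eq_true, if_false]
      show _ = pvLoopB x (n+1) (i+1) (pvW x i)
      rw [show pvLoopB x (n+1) (i+1) (pvW x i)
            = (if pvW x i + (pvG x (i+1+4) - pvG x (i+1-1)) == 0 then true
               else pvLoopB x n (i+1+1) (pvW x i + (pvG x (i+1+4) - pvG x (i+1-1)))) from rfl]
      have hidx : i + 1 - 1 = i := by ring
      rw [hidx, ← pvW_shift]

-- ===== VERDICT (by name: the statement is the Claim_ definition above) =====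
theorem sum_5_consecutive_spec : Claim_equal_sum_5_consecutive := by
  intro x _
  unfold Spec_sum_5_consecutive sum_5_consecutive sum_5_consecutive_alt
  by_cases h : x.length < 5
  · simp [h]
  · have h5 : 5 ≤ x.length := by omega
    have hk : x.length - 4 = (x.length - 5) + 1 := by omega
    simp only [h, if_false]
    rw [hk, pvLoopA_eq x (x.length - 5) 0]
    rfl
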